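-- pv_equiv track=rewrite | github.com/josi-ai/josi-svc | src/josi/services/remedy_recommendation_service.py | _analyze_house_issues
-- ===== SOURCE A (Python) =====
-- from typing import List, Dict, Optional, Any, Tuple
--
-- def _analyze_house_issues(planets: Dict, houses: List) -> Dict[int, List[str]]:
--     """Analyze house-specific issues."""
--     house_issues = {}
--
--     for house_num in range(1, 13):
--         issues = []
--
--         # Check for malefic planets in the house
--         house_planets = [
--             planet for planet, data in planets.items()
--             if data.get("house") == house_num
--         ]
--
--         malefics = ["Mars", "Saturn", "Rahu", "Ketu"]
--         house_malefics = [p for p in house_planets if p in malefics]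
--
--         if house_malefics:
--             issues.append(f"malefic_planets: {', '.join(house_malefics)}")
--
--         # Check for empty houses (depending on context)
--         if not house_planets and house_num in [1, 5, 7, 10]:  # Important houses
--             issues.append("empty_house")
--
--         # Check for overcrowded houses
--         if len(house_planets) >= 4:
--             issues.append("overcrowded")
--
--         if issues:
--             house_issues[house_num] = issues
--
--     return house_issues
-- ===== SOURCE B (Python) =====
-- def _analyze_house_issues(planets, houses):
--     """Analyze house-specific issues: one grouping pass over planets, then a pass over houses 1..12."""
--     groups = {}
--     for planet, data in planets.items():
--         h = data.get("house")
--         if h in groups: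
--             groups[h].append(planet)
--         else:
--             groups[h] = [planet]
--
--     malefics = ["Mars", "Saturn", "Rahu", "Ketu"]
--     house_issues = {}
--     for house_num in range(1, 13):
--         house_planets = groups.get(house_num, [])
--         issues = []
--         house_malefics = [p for p in house_planets if p in malefics]
--         if house_malefics:
--             issues.append("malefic_planets: " + ", ".join(house_malefics))
--         if not house_planets and house_num in [1, 5, 7, 10]:
--             issues.append("empty_house")
--         if len(house_planets) >= 4:
--             issues.append("overcrowded")
--         if issues:
--             house_issues[house_num] = issues
--     return house_issues
-- ===== Notes on version B (the rewrite author's own statement) =====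
-- stated objective: faster
-- what changed: B makes a single grouping pass over planets building a dict house->list of planet names, then derives each house's issues from that index, instead of A's twelve full re-scans of the planet dict.
import Mathlib
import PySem

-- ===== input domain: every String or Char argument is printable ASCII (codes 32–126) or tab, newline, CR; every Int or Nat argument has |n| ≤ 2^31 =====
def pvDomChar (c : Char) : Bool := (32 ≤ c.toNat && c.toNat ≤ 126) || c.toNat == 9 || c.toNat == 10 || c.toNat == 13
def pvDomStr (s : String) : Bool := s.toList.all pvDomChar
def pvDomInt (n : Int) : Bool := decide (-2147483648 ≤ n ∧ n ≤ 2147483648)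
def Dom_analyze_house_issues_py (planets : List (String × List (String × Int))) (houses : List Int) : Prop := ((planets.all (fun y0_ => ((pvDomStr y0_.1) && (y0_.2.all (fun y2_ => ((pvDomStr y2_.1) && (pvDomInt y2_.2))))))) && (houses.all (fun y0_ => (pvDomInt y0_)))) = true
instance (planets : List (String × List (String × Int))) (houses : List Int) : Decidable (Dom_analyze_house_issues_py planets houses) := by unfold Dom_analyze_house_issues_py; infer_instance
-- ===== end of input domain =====

-- B replaces A's twelve scans of the planet dict with ONE grouping pass (dict of house → planet names)
-- followed by a pass over houses 1..12; objective: faster (constant-factor: one scan instead of twelve).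
-- 'houses' is unused by both A and B (as in the original).

-- ===== PORT A =====
-- per-house issue list (identical check text in A and B; A applies it to its per-house re-scan,
-- B to the pre-grouped list)
def pvIssues (house_planets : List String) (house_num : Int) : List String :=
  let malefics : List String := ["Mars", "Saturn", "Rahu", "Ketu"]
  let house_malefics := house_planets.filter (fun p => malefics.contains p)
  let issues : List String := []
  let issues := if house_malefics ≠ [] then
      issues ++ ["malefic_planets: " ++ PySem.Str.join ", " house_malefics] else issues
  let issues := if house_planets = [] ∧ house_num ∈ ([1, 5, 7, 10] : List Int) then
      issues ++ ["empty_house"] else issues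
  let issues := if house_planets.length ≥ 4 then issues ++ ["overcrowded"] else issues
  issues

def analyze_house_issues_py (planets : List (String × List (String × Int))) (houses : List Int) : List (Int × List String) :=
  let house_issues :=
    (PySem.List.pyRange 1 13).foldl (fun hi house_num =>
      -- comprehension over planets.items(), re-scanned for every house
      let house_planets := planets.foldl (fun acc pd =>
        if (PySem.Dict.mk pd.2).get? "house" == some house_num then acc ++ [pd.1] else acc) []
      let issues := pvIssues house_planets house_num
      if issues ≠ [] then hi.insert house_num issues else hi) PySem.Dict.empty
  house_issues.items

-- ===== PORT B =====
def analyze_house_issues_py_alt (planets : List (String × List (String × Int))) (houses : List Int) : List (Int × List String) :=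
  -- one pass: group planet names by their (optional) house value
  let groups : PySem.Dict (Option Int) (List String) :=
    planets.foldl (fun g pd =>
      g.modify ((PySem.Dict.mk pd.2).get? "house") [] (· ++ [pd.1])) PySem.Dict.empty
  let house_issues :=
    (PySem.List.pyRange 1 13).foldl (fun hi house_num =>
      let house_planets := groups.getD (some house_num) []
      let issues := pvIssues house_planets house_num
      if issues ≠ [] then hi.insert house_num issues else hi) PySem.Dict.empty
  house_issues.items

-- ===== PRECONDITION & SPEC =====
def Spec_analyze_house_issues_py (planets : List (String × List (String × Int))) (houses : List Int) (out : List (Int × List String)) : Prop := out = analyze_house_issues_py_alt planets houses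
instance (planets : List (String × List (String × Int))) (houses : List Int) (out : List (Int × List String)) : Decidable (Spec_analyze_house_issues_py planets houses out) := by unfold Spec_analyze_house_issues_py; infer_instance

-- ===== CLAIM (what is proved, stated in full; the proofs are below) =====
def Claim_equal_analyze_house_issues_py : Prop := ∀ (planets : List (String × List (String × Int))) (houses : List Int), Dom_analyze_house_issues_py planets houses → Spec_analyze_house_issues_py planets houses (analyze_house_issues_py planets houses)

-- ===== LEMMAS AND PROOFS =====
-- B's grouped lookup for a house equals A's comprehension over the planet list
theorem pvGroup_lookup (planets : List (String × List (String × Int))) (h : Int) :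
    (planets.foldl (fun g pd =>
        g.modify ((PySem.Dict.mk pd.2).get? "house") [] (· ++ [pd.1])) PySem.Dict.empty).getD (some h) []
    = planets.foldl (fun acc pd =>
        if (PySem.Dict.mk pd.2).get? "house" == some h then acc ++ [pd.1] else acc) [] := by
  rw [← List.foldl_map (f := fun pd : String × List (String × Int) => ((PySem.Dict.mk pd.2).get? "house", pd.1)) (g := fun d p => PySem.Dict.modify d p.1 [] (· ++ [p.2]))]
  rw [PySem.Dict.getD_foldl_modify_append]
  simp only [PySem.List.foldl_append_if]
  simp [List.filter_map, List.map_map, Function.comp_def]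

-- ===== VERDICT (by name: the statement is the Claim_ definition above) =====
theorem analyze_house_issues_py_spec : Claim_equal_analyze_house_issues_py := by
  intro planets houses _
  simp only [Spec_analyze_house_issues_py, analyze_house_issues_py, analyze_house_issues_py_alt]
  congr 1
  apply PySem.List.foldl_congr_mem
  intro hi house_num _
  rw [pvGroup_lookup]
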